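-- pv_equiv track=rewrite | github.com/NobuyukiInoue/pyHitAndBlow | pyHitAndBlow.py | create_target_numbers
-- ===== SOURCE A (Python) =====
-- def create_target_numbers(n:int)-> [str]:
--     """
--     create target numbers.
--     """
--     target_numbers = []
--
--     def sub_create_target_numbers(n, workStr):
--         if n == 0:
--             target_numbers.append(workStr)
--             return
--         for i in range(0, 10):
--             if str(i) not in workStr:
--                 sub_create_target_numbers(n - 1, workStr + str(i))
--
--     if n == 1:
--         for i in range(0, 10):
--             target_numbers.append(str(i))
--
--     elif n > 1:
--         for i in range(0, 10):
--             sub_create_target_numbers(n - 1, str(i))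
--
--     return target_numbers
-- ===== SOURCE B (Python) =====
-- def create_target_numbers(n: int) -> [str]:
--     """
--     create target numbers.
--     """
--     if n < 1:
--         return []
--
--     def perms(pool, r):
--         # all length-r arrangements of the characters of pool, in
--         # "pick each remaining character in pool order" (lexicographic) order
--         if r == 0:
--             return ['']
--         return [pool[i] + rest
--                 for i in range(len(pool))
--                 for rest in perms(pool[:i] + pool[i + 1:], r - 1)]
--
--     return perms('0123456789', n)
-- ===== Notes on version B (the rewrite author's own statement) =====
-- stated objective: alternative
-- what changed: Replaces the shared-accumulator DFS that rescans the built prefix string for digit membership with a pure recursive permutation generator that passes down the shrinking pool of unused digits and assembles the result from return values.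
import Mathlib
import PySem

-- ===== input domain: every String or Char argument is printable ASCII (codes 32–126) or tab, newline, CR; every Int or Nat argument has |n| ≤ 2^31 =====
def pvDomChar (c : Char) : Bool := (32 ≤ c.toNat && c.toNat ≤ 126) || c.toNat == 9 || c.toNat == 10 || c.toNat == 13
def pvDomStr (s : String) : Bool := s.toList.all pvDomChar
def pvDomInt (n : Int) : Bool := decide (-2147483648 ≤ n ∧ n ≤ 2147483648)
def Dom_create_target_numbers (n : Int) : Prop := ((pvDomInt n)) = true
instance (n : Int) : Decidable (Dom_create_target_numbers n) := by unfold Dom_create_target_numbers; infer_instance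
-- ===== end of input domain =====

-- B replaces A's shared-accumulator DFS (membership-test on the built prefix) by a pure
-- recursive permutation generator over the shrinking pool of unused digits (alternative; same cost).

-- ===== PORT A =====
-- sub_create_target_numbers: the inner recursion; workStr is carried as its character list
-- (PySem.Chars.isIn is the exact 'str(i) in workStr' substring test), the shared
-- target_numbers list becomes the returned list (appends in the same order).
def pvSubA : Nat → List Char → List String
  | 0, w => [String.ofList w]
  | m + 1, w =>
      (PySem.List.pyRange 0 10 1).foldl
        (fun acc i =>
          if PySem.Chars.isIn (PySem.Int.toChars i) w then acc
          else acc ++ pvSubA m (w ++ PySem.Int.toChars i)) []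

def create_target_numbers (n : Int) : List String :=
  if n == 1 then
    (PySem.List.pyRange 0 10 1).foldl (fun acc i => acc ++ [PySem.Int.toStr i]) []
  else if 1 < n then
    (PySem.List.pyRange 0 10 1).foldl
      (fun acc i => acc ++ pvSubA (n - 1).toNat (PySem.Int.toChars i)) []
  else []

-- ===== PORT B =====
-- perms from Source B: pool[:i] + pool[i+1:] is List.eraseIdx, pool[i] + rest is cons
-- (strings are carried as their character lists, joined by String.ofList at the end).
def pvPermsB : List Char → Nat → List (List Char)
  | _, 0 => [[]]
  | pool, r + 1 =>
      (List.range pool.length).flatMap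
        (fun i => (pvPermsB (pool.eraseIdx i) r).map (fun rest => pool.getD i ' ' :: rest))

def create_target_numbers_alt (n : Int) : List String :=
  if n < 1 then []
  else (pvPermsB "0123456789".toList n.toNat).map String.ofList

-- ===== PRECONDITION & SPEC =====
def Spec_create_target_numbers (n : Int) (out : List String) : Prop := out = create_target_numbers_alt n
instance (n : Int) (out : List String) : Decidable (Spec_create_target_numbers n out) := by unfold Spec_create_target_numbers; infer_instance

-- ===== CLAIM (what is proved, stated in full; the proofs are below) =====
def Claim_equal_create_target_numbers : Prop := ∀ (n : Int), Dom_create_target_numbers n → Spec_create_target_numbers n (create_target_numbers n)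

-- ===== LEMMAS AND PROOFS =====

-- the digits of '0123456789' as A's loop produces them
def pvDigits : List Char := "0123456789".toList

-- the digits A's guard still allows after prefix w
def pvAvail (w : List Char) : List Char :=
  pvDigits.filter (fun c => !(PySem.Chars.isIn [c] w))

theorem pvIsIn_singleton (c : Char) (w : List Char) :
    PySem.Chars.isIn [c] w = w.contains c := by
  simp only [List.contains_eq_mem]
  by_cases h : c ∈ w
  · have hin : [c] <:+: w := by
      obtain ⟨s, t, rfl⟩ := List.append_of_mem h
      exact ⟨s, t, by simp⟩
    rw [(PySem.Chars.isIn_iff_infix _ _).mpr hin]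
    simp [h]
  · have hni : ¬ ([c] <:+: w) := fun hin => h (hin.subset (by simp))
    have hf : PySem.Chars.isIn [c] w = false := by
      cases hb : PySem.Chars.isIn [c] w
      · rfl
      · exact absurd ((PySem.Chars.isIn_iff_infix _ _).mp hb) hni
    rw [hf]
    simp [h]

theorem pvAvail_nodup (w : List Char) : (pvAvail w).Nodup :=
  List.Nodup.filter _ (by decide)

-- availability after extending the prefix by one digit: filter the old pool
theorem pvAvail_append (w : List Char) (d : Char) :
    pvAvail (w ++ [d]) = (pvAvail w).filter (fun c => c != d) := by
  unfold pvAvail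
  rw [List.filter_filter]
  apply List.filter_congr
  intro c _
  simp only [pvIsIn_singleton, List.contains_eq_mem, List.mem_append, List.mem_singleton]
  by_cases h1 : c ∈ w <;> by_cases h2 : c = d <;> simp [h1, h2]

-- index-driven flatMap over a nodup list = element-driven flatMap with erase
theorem pvFlatMap_index {β : Type} (l : List Char) (F : Char → List Char → List β)
    (h : l.Nodup) :
    (List.range l.length).flatMap (fun i => F (l.getD i ' ') (l.eraseIdx i))
      = l.flatMap (fun d => F d (l.erase d)) := by
  induction l generalizing F with
  | nil => simp
  | cons p rest ih =>
    have hp : p ∉ rest := (List.nodup_cons.mp h).1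
    have hrest : rest.Nodup := (List.nodup_cons.mp h).2
    rw [List.length_cons, List.range_succ_eq_map, List.flatMap_cons, List.flatMap_map]
    simp only [List.getD_cons_zero, List.eraseIdx_cons_zero, Nat.succ_eq_add_one,
      List.getD_cons_succ, List.eraseIdx_cons_succ]
    rw [ih (fun d t => F d (p :: t)) hrest, List.flatMap_cons, List.erase_cons_head]
    congr 1
    apply List.flatMap_congr
    intro d hd
    have hne : p ≠ d := fun he => hp (he ▸ hd)
    rw [List.erase_cons_tail (by simpa using hne)]

-- selection characterisation of B's generator on a nodup pool
theorem pvPermsB_succ_nodup (pool : List Char) (m : Nat) (h : pool.Nodup) :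
    pvPermsB pool (m + 1)
      = pool.flatMap (fun d => (pvPermsB (pool.erase d) m).map (fun rest => d :: rest)) := by
  rw [show pvPermsB pool (m + 1)
      = (List.range pool.length).flatMap
          (fun i => (pvPermsB (pool.eraseIdx i) m).map (fun rest => pool.getD i ' ' :: rest))
      from rfl]
  exact pvFlatMap_index pool (fun d t => (pvPermsB t m).map (fun rest => d :: rest)) h

-- every loop index of A yields a single digit character
theorem pvToChars_singleton (i : Int) (hi : i ∈ PySem.List.pyRange 0 10 1) :
    ∃ c, PySem.Int.toChars i = [c] := by
  fin_cases hi <;> exact ⟨_, rfl⟩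

-- guarded flatMap over a list of single-digit ints = flatMap over the filtered digit pool
theorem pvGuard_aux (l : List Int) (w : List Char) (f : List Char → List String)
    (hs : ∀ i ∈ l, ∃ c, PySem.Int.toChars i = [c]) :
    l.flatMap (fun i => if PySem.Chars.isIn (PySem.Int.toChars i) w then []
                        else f (w ++ PySem.Int.toChars i))
      = ((l.flatMap PySem.Int.toChars).filter
          (fun c => !(PySem.Chars.isIn [c] w))).flatMap (fun d => f (w ++ [d])) := by
  induction l with
  | nil => simp
  | cons i l' ih =>
    obtain ⟨c, hc⟩ := hs i (List.mem_cons_self ..)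
    have ih' := ih (fun j hj => hs j (List.mem_cons_of_mem i hj))
    by_cases h : PySem.Chars.isIn [c] w <;>
      simp [hc, h, ih']

theorem pvGuard_flatMap (w : List Char) (f : List Char → List String) :
    (PySem.List.pyRange 0 10 1).flatMap
        (fun i => if PySem.Chars.isIn (PySem.Int.toChars i) w then []
                  else f (w ++ PySem.Int.toChars i))
      = (pvAvail w).flatMap (fun d => f (w ++ [d])) := by
  rw [pvGuard_aux _ w f pvToChars_singleton]
  rw [show (PySem.List.pyRange 0 10 1).flatMap PySem.Int.toChars = pvDigits from by decide]
  rfl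

-- main invariant: A's inner recursion enumerates B's permutations of the available pool
theorem pvSubA_eq (m : Nat) : ∀ w : List Char,
    pvSubA m w = (pvPermsB (pvAvail w) m).map (fun t => String.ofList (w ++ t)) := by
  induction m with
  | zero => intro w; simp [pvSubA, pvPermsB]
  | succ m ih =>
    intro w
    rw [show pvSubA (m + 1) w
        = (PySem.List.pyRange 0 10 1).foldl
            (fun acc i =>
              if PySem.Chars.isIn (PySem.Int.toChars i) w then acc
              else acc ++ pvSubA m (w ++ PySem.Int.toChars i)) [] from rfl]
    rw [PySem.List.foldl_congr_mem _ _
        (fun acc i => acc ++ (if PySem.Chars.isIn (PySem.Int.toChars i) w then []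
                              else pvSubA m (w ++ PySem.Int.toChars i))) _
        (by intro acc i _
            by_cases h : PySem.Chars.isIn (PySem.Int.toChars i) w <;> simp [h])]
    rw [PySem.List.foldl_append_eq_flatMap, List.nil_append]
    rw [pvGuard_flatMap w (fun u => pvSubA m u)]
    rw [pvPermsB_succ_nodup _ m (pvAvail_nodup w), List.map_flatMap]
    apply List.flatMap_congr
    intro d hd
    rw [ih (w ++ [d]), pvAvail_append, List.map_map,
        (pvAvail_nodup w).erase_eq_filter d]
    apply List.map_congr_left
    intro t _
    simp

-- A's top-level n > 1 loop = B's permutation list over the full pool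
theorem pvTop (m : Nat) :
    (PySem.List.pyRange 0 10 1).foldl
        (fun acc i => acc ++ pvSubA m (PySem.Int.toChars i)) []
      = (pvPermsB pvDigits (m + 1)).map String.ofList := by
  rw [PySem.List.foldl_append_eq_flatMap, List.nil_append]
  have hguard : (PySem.List.pyRange 0 10 1).flatMap
      (fun i => pvSubA m (PySem.Int.toChars i))
    = (PySem.List.pyRange 0 10 1).flatMap
        (fun i => if PySem.Chars.isIn (PySem.Int.toChars i) ([] : List Char) then []
                  else pvSubA m (([] : List Char) ++ PySem.Int.toChars i)) := by
    apply List.flatMap_congr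
    intro i hi
    obtain ⟨c, hc⟩ := pvToChars_singleton i hi
    rw [hc]
    rfl
  rw [hguard, pvGuard_flatMap ([] : List Char) (fun u => pvSubA m u)]
  rw [pvPermsB_succ_nodup pvDigits m (by decide), List.map_flatMap]
  have havail : pvAvail ([] : List Char) = pvDigits := by decide
  rw [havail]
  apply List.flatMap_congr
  intro d hd
  rw [show ([] : List Char) ++ [d] = [d] from rfl, pvSubA_eq m [d],
      show pvAvail [d] = pvAvail (([] : List Char) ++ [d]) from rfl,
      pvAvail_append, List.map_map, havail,
      (show pvDigits.Nodup from by decide).erase_eq_filter d]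
  apply List.map_congr_left
  intro t _
  rfl

-- ===== VERDICT (by name: the statement is the Claim_ definition above) =====
theorem create_target_numbers_spec : Claim_equal_create_target_numbers := by
  intro n _
  unfold Spec_create_target_numbers create_target_numbers create_target_numbers_alt
  by_cases h1 : n = 1
  · subst h1; decide
  · by_cases h2 : 1 < n
    · rw [if_neg (by simp [h1]), if_pos h2, if_neg (by omega : ¬ n < 1),
          show n.toNat = (n - 1).toNat + 1 from by omega]
      exact pvTop (n - 1).toNat
    · rw [if_neg (by simp [h1]), if_neg h2, if_pos (by omega : n < 1)]
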